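-- pv_equiv track=rewrite | github.com/taeyoonnoh/Coding_Tips | [노태윤]/Good Problems/Programmers/2개 이하로 다른 비트/solution.py | solution
-- ===== SOURCE A (Python) =====
-- def solution(numbers):
--     answer = []
--     for number in numbers :
--         new = number
--         a_bit = format(number,'b').zfill(17)
--         while True :
--             new+=1
--             b_bit = format(new,'b').zfill(17)
--             c = list(zip(list(a_bit),list(b_bit)))
--             diff_bit = sum(list(map(lambda x : x[0]!=x[1],c)))
--             if diff_bit <= 2 :
--                 break
--         answer.append(new)
--     return answer
-- ===== SOURCE B (Python) =====
-- # Instead of scanning n+1, n+2, ... until a value passes, test only the jump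
-- # candidates n + 2**i and n + 2**i - 1, in increasing order (the first value
-- # whose zero-padded binary rendering differs from n's in at most two places is
-- # always one of these), and return the first candidate that passes the same
-- # rendering test.
-- _STEPS = [1, 2] + [x for i in range(2, 33) for x in ((1 << i) - 1, 1 << i)]
--
--
-- def solution(numbers):
--     answer = []
--     for n in numbers:
--         a = format(n, 'b').zfill(17)
--         for step in _STEPS:
--             m = n + step
--             b = format(m, 'b').zfill(17)
--             if sum(x != y for x, y in zip(a, b)) <= 2:
--                 answer.append(m)
--                 break
--     return answer
-- ===== Notes on version B (the rewrite author's own statement) =====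
-- stated objective: faster
-- what changed: A finds each answer by scanning new = n+1, n+2, ... and re-rendering both numbers as zero-filled binary strings to count differing characters at every single probe; B probes only the jump candidates n + 2^i and n + 2^i - 1 in increasing order under the same rendering test and returns the first hit, so each element needs at most ~64 probes (and typically 2-4) instead of a scan of up to 2^29 probes.
import Mathlib
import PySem

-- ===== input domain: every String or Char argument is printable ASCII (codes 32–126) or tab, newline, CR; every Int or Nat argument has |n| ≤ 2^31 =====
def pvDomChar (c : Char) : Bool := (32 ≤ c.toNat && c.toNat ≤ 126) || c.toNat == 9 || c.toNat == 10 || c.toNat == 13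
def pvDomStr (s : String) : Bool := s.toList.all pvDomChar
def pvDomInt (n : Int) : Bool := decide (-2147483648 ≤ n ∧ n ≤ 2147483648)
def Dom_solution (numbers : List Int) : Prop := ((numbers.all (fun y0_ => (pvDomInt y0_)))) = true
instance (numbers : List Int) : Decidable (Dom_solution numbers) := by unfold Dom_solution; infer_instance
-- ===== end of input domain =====

-- B replaces A's per-element exhaustive scan by testing only the jump candidates n + 2^i and
-- n + 2^i - 1 in increasing order under the same rendering test and returning the first hit.

-- ===== PORT A =====
-- diff_bit = sum(list(map(lambda x : x[0]!=x[1], zip(list(a_bit),list(b_bit)))))  (True sums as 1)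
def pvDiffBit (a b : List Char) : Int :=
  ((a.zip b).map (fun x => if x.1 ≠ x.2 then (1 : Int) else 0)).sum

-- format(number,'b').zfill(17), as a list of characters
def pvABit (n : Int) : List Char := PySem.Chars.zfill (PySem.Int.toBinChars n) 17

-- the `while True` loop; the fuel argument only makes the recursion total (the break is always
-- reached within 2^28 steps on |number| ≤ 2^31, so the fuel 2^31 is never exhausted on Dom)
def pvLoopA : Nat → List Char → Int → Int
  | 0, _, new => new + 1
  | f + 1, a, new =>
      if pvDiffBit a (pvABit (new + 1)) ≤ 2 then new + 1 else pvLoopA f a (new + 1)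

def solution (numbers : List Int) : List Int :=
  numbers.foldl (fun answer number => answer ++ [pvLoopA 2147483648 (pvABit number) number]) []

-- ===== PORT B =====
-- _STEPS = [1, 2] + [x for i in range(2, 33) for x in ((1 << i) - 1, 1 << i)]
def pvSteps : List Int :=
  [1, 2] ++ (List.range 31).flatMap (fun i => [2 ^ (i + 2) - 1, 2 ^ (i + 2)])

-- the inner candidate loop: the first step whose rendering passes the diff test (the break)
def pvFindStep (n : Int) : Option Int :=
  pvSteps.find? (fun step => decide (pvDiffBit (pvABit n) (pvABit (n + step)) ≤ 2))

def solution_alt (numbers : List Int) : List Int :=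
  numbers.foldl
    (fun answer n => answer ++ ((pvFindStep n).map (fun step => n + step)).toList) []

-- ===== PRECONDITION & SPEC =====
def Spec_solution (numbers : List Int) (out : List Int) : Prop :=
  out = solution_alt numbers
instance (numbers : List Int) (out : List Int) : Decidable (Spec_solution numbers out) := by
  unfold Spec_solution; infer_instance

-- ===== CLAIM (what is proved, stated in full; the proofs are below) =====
def Claim_equal_solution : Prop :=
  ∀ (numbers : List Int), Dom_solution numbers → Spec_solution numbers (solution numbers)

-- ===== LEMMAS AND PROOFS =====

-- ---- proof-side binary machinery ----

-- MSB-first binary digits of a natural number ([] for 0)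
def binStr (n : Nat) : List Char :=
  if h : n = 0 then [] else binStr (n / 2) ++ [Nat.digitChar (n % 2)]
termination_by n
decreasing_by exact Nat.div_lt_self (Nat.pos_of_ne_zero h) (by norm_num)

-- LSB-first fixed-width digits
def lsbFix : Nat → Nat → List Char
  | 0, _ => []
  | w + 1, n => Nat.digitChar (n % 2) :: lsbFix w (n / 2)

-- number of differing bits in the low w bits
def cnt : Nat → Nat → Nat → Nat
  | 0, _, _ => 0
  | w + 1, u, v => (if u % 2 = v % 2 then 0 else 1) + cnt w (u / 2) (v / 2)

-- bit length, proof-side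
def pvBitLen (x : Nat) : Nat :=
  if h : x = 0 then 0 else pvBitLen (x / 2) + 1
termination_by x
decreasing_by exact Nat.div_lt_self (Nat.pos_of_ne_zero h) (by norm_num)

-- MSB-first, left-padded with '0' to width W
def fixM (W n : Nat) : List Char := List.replicate (W - (binStr n).length) '0' ++ binStr n

lemma pvBitLen_le_iff (w : Nat) : ∀ n, pvBitLen n ≤ w ↔ n < 2 ^ w := by
  induction w with
  | zero =>
    intro n
    rw [pvBitLen]
    split
    · omega
    · simp only [pow_zero]
      constructor
      · omega
      · omega
  | succ w ih =>
    intro n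
    rw [pvBitLen]
    split
    · rename_i h; subst h; simp
    · rename_i h
      have h2 : n / 2 < 2 ^ w ↔ n < 2 ^ (w + 1) := by
        rw [Nat.div_lt_iff_lt_mul (by norm_num)]
        rw [pow_succ]
      rw [Nat.add_le_add_iff_right, ih (n / 2), h2]
lemma lt_two_pow_pvBitLen (n : Nat) : n < 2 ^ pvBitLen n := by
  exact (pvBitLen_le_iff (pvBitLen n) n).mp le_rfl
lemma pvBitLen_mono {a b : Nat} (h : a ≤ b) : pvBitLen a ≤ pvBitLen b := by
  exact (pvBitLen_le_iff (pvBitLen b) a).mpr (lt_of_le_of_lt h (lt_two_pow_pvBitLen b))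
lemma binStr_length (n : Nat) : (binStr n).length = pvBitLen n := by
  induction n using Nat.strong_induction_on with
  | _ n ih =>
    rw [binStr, pvBitLen]
    split
    · simp
    · rename_i h
      simp [ih (n / 2) (Nat.div_lt_self (Nat.pos_of_ne_zero h) (by norm_num))]
lemma binStr_chars (n : Nat) : ∀ c ∈ binStr n, c = '0' ∨ c = '1' := by
  induction n using Nat.strong_induction_on with
  | _ n ih =>
    rw [binStr]
    split
    · simp
    · rename_i h
      intro c hc
      rw [List.mem_append] at hc
      rcases hc with hc | hc
      · exact ih (n / 2) (Nat.div_lt_self (Nat.pos_of_ne_zero h) (by norm_num)) c hc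
      · have h2 : n % 2 = 0 ∨ n % 2 = 1 := by omega
        rcases h2 with h2 | h2 <;> simp [h2, Nat.digitChar] at hc <;> simp [hc]

lemma toDigitsCore_eq (f : Nat) : ∀ n ds, 0 < n → n < 2 ^ f →
    Nat.toDigitsCore 2 f n ds = binStr n ++ ds := by
  induction f with
  | zero => intro n ds h1 h2; omega
  | succ f ih =>
    intro n ds h1 h2
    rw [Nat.toDigitsCore]
    by_cases h : n / 2 = 0
    · simp only [h, if_true]
      rw [binStr]
      have hn : ¬ n = 0 := by omega
      rw [dif_neg hn, h, binStr]
      simp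
    · simp only [h, if_false]
      rw [ih (n / 2) _ (Nat.pos_of_ne_zero h)
        (by rw [Nat.div_lt_iff_lt_mul (by norm_num)]; rw [pow_succ] at h2; exact h2)]
      conv_rhs => rw [binStr]
      have hn : ¬ n = 0 := by omega
      rw [dif_neg hn]
      simp
lemma toDigits_eq (n : Nat) : Nat.toDigits 2 n = if n = 0 then ['0'] else binStr n := by
  by_cases h : n = 0
  · subst h; rfl
  · rw [if_neg h, Nat.toDigits,
      toDigitsCore_eq (n + 1) n [] (Nat.pos_of_ne_zero h)
        (Nat.lt_two_pow_self.trans_le (Nat.pow_le_pow_right (by norm_num) (by omega)))]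
    simp
lemma binStr_ne_nil (n : Nat) (h : n ≠ 0) : binStr n ≠ [] := by
  intro hnil
  have hl := binStr_length n
  rw [hnil] at hl
  simp at hl
  have h2 : n < 2 ^ 0 := by rw [hl]; exact lt_two_pow_pvBitLen n
  omega

lemma zfill_nonneg (n : Nat) :
    pvABit (n : Int) = fixM (max 17 (pvBitLen n)) n := by
  unfold pvABit PySem.Int.toBinChars
  rw [if_neg (by omega : ¬ (n : Int) < 0)]
  have htn : (n : Int).toNat = n := by omega
  rw [htn, toDigits_eq]
  by_cases h0 : n = 0
  · subst h0
    rw [if_pos rfl]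
    have hb0 : pvBitLen 0 = 0 := by rw [pvBitLen]; simp
    have hs0 : binStr 0 = [] := by rw [binStr]; simp
    rw [hb0]
    unfold fixM
    rw [hs0]
    decide
  · rw [if_neg h0]
    obtain ⟨c, rest, hcr⟩ := List.exists_cons_of_ne_nil (binStr_ne_nil n h0)
    have hc : c = '0' ∨ c = '1' := binStr_chars n c (by rw [hcr]; simp)
    have hlc : rest.length + 1 = pvBitLen n := by
      have h := binStr_length n
      rw [hcr] at h
      simpa using h
    unfold PySem.Chars.zfill
    rw [hcr]
    by_cases hbig : 17 ≤ pvBitLen n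
    · rw [if_pos (by simp; exact_mod_cast by omega)]
      unfold fixM
      rw [hcr]
      have hm : max 17 (pvBitLen n) = pvBitLen n := by omega
      rw [hm]
      simp
      omega
    · rw [if_neg (by simp; exact_mod_cast by omega)]
      simp only []
      rw [if_neg (by rcases hc with h | h <;> subst h <;> decide)]
      unfold fixM
      rw [hcr]
      have hm : max 17 (pvBitLen n) = 17 := by omega
      rw [hm]
      have hr : (17:Int).toNat - (c :: rest).length = 17 - (c :: rest).length := by
        simp
      rw [hr]
lemma zfill_neg (n : Nat) (h : 0 < n) :
    pvABit (-(n : Int)) = '-' :: fixM (max 16 (pvBitLen n)) n := by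
  unfold pvABit PySem.Int.toBinChars
  rw [if_pos (by omega : (-(n : Int)) < 0)]
  have htn : (-(n : Int)).natAbs = n := by omega
  rw [htn, toDigits_eq, if_neg (by omega : ¬ n = 0)]
  have hlc : (('-' :: binStr n).length : Int) = (pvBitLen n : Int) + 1 := by
    simp [binStr_length]
  unfold PySem.Chars.zfill
  by_cases hbig : 16 ≤ pvBitLen n
  · rw [if_pos (by rw [hlc]; exact_mod_cast by omega)]
    unfold fixM
    have hm : max 16 (pvBitLen n) = pvBitLen n := by omega
    rw [hm, binStr_length]
    simp
  · rw [if_neg (by rw [hlc]; exact_mod_cast by omega)]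
    simp only []
    unfold fixM
    have hm : max 16 (pvBitLen n) = 16 := by omega
    rw [hm]
    simp [binStr_length]
lemma lsbFix_zero (W : Nat) : lsbFix W 0 = List.replicate W '0' := by
  induction W with
  | zero => rfl
  | succ W ih => simp [lsbFix, List.replicate_succ, ih, Nat.digitChar]

lemma fixM_eq_rev (W : Nat) : ∀ n, n < 2 ^ W → fixM W n = (lsbFix W n).reverse := by
  induction W with
  | zero =>
    intro n h
    have : n = 0 := by simpa using h
    subst this
    simp [fixM, lsbFix, binStr]
  | succ W ih =>
    intro n h
    by_cases h0 : n = 0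
    · subst h0
      have hs0 : binStr 0 = [] := by rw [binStr]; simp
      simp [fixM, hs0, lsbFix_zero, List.reverse_replicate]
    · rw [lsbFix]
      rw [List.reverse_cons, ← ih (n / 2) (by rw [Nat.div_lt_iff_lt_mul (by norm_num)]; rw [pow_succ] at h; exact h)]
      unfold fixM
      conv_lhs => rw [binStr, dif_neg h0]
      rw [List.length_append]
      simp only [List.length_singleton]
      rw [← List.append_assoc]
      have hlen : (binStr (n / 2)).length ≤ W := by
        rw [binStr_length, pvBitLen_le_iff]
        rw [Nat.div_lt_iff_lt_mul (by norm_num)]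
        rw [pow_succ] at h
        exact h
      have heq : W + 1 - ((binStr (n / 2)).length + 1) = W - (binStr (n / 2)).length := by
        omega
      rw [heq]
lemma diffBit_cons (c : Char) (xs ys : List Char) :
    pvDiffBit (c :: xs) (c :: ys) = pvDiffBit xs ys := by
  simp [pvDiffBit, List.zip_cons_cons]

lemma diffBit_cons_ne (c d : Char) (h : c ≠ d) (xs ys : List Char) :
    pvDiffBit (c :: xs) (d :: ys) = 1 + pvDiffBit xs ys := by
  simp [pvDiffBit, List.zip_cons_cons, h]
lemma diffBit_append (xs ys us vs : List Char) (h : xs.length = us.length) :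
    pvDiffBit (xs ++ ys) (us ++ vs) = pvDiffBit xs us + pvDiffBit ys vs := by
  simp [pvDiffBit, List.zip_append h]

lemma diffBit_rev (xs : List Char) : ∀ ys : List Char, xs.length = ys.length →
    pvDiffBit xs.reverse ys.reverse = pvDiffBit xs ys := by
  induction xs with
  | nil =>
    intro ys h
    have : ys = [] := List.eq_nil_of_length_eq_zero h.symm
    subst this
    rfl
  | cons x xs ih =>
    intro ys h
    match ys with
    | [] => simp at h
    | y :: ys =>
      simp at h
      rw [List.reverse_cons, List.reverse_cons,
        diffBit_append _ _ _ _ (by simp [h]), ih ys h]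
      by_cases hxy : x = y
      · subst hxy
        rw [diffBit_cons]
        simp [pvDiffBit]
      · rw [diffBit_cons_ne _ _ hxy]
        simp only [pvDiffBit, List.zip_cons_cons, List.zip_nil_right, List.map_cons,
          List.map_nil, List.sum_cons, List.sum_nil, ne_eq, hxy,
          not_false_iff, if_true]
        omega
lemma diffBit_lsb (W : Nat) : ∀ u v, pvDiffBit (lsbFix W u) (lsbFix W v) = (cnt W u v : Int) := by
  induction W with
  | zero => intro u v; simp [lsbFix, pvDiffBit, cnt]
  | succ W ih =>
    intro u v
    rw [lsbFix, lsbFix, cnt]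
    by_cases h : u % 2 = v % 2
    · rw [h, diffBit_cons, ih]
      simp
    · have hd : Nat.digitChar (u % 2) ≠ Nat.digitChar (v % 2) := by
        have hu : u % 2 = 0 ∨ u % 2 = 1 := by omega
        have hv : v % 2 = 0 ∨ v % 2 = 1 := by omega
        rcases hu with hu | hu <;> rcases hv with hv | hv <;>
          simp [hu, hv] at h ⊢ <;> decide
      rw [diffBit_cons_ne _ _ hd, ih]
      rw [if_neg h]
      push_cast
      ring
lemma lsbFix_length (W : Nat) : ∀ n, (lsbFix W n).length = W := by
  induction W with
  | zero => intro n; rfl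
  | succ W ih => intro n; simp [lsbFix, ih]

lemma diffBit_fix (W u v : Nat) (hu : u < 2 ^ W) (hv : v < 2 ^ W) :
    pvDiffBit (fixM W u) (fixM W v) = (cnt W u v : Int) := by
  rw [fixM_eq_rev W u hu, fixM_eq_rev W v hv,
    diffBit_rev _ _ (by rw [lsbFix_length, lsbFix_length]), diffBit_lsb]
lemma diffBit_trunc (xs : List Char) : ∀ (ys : List Char) (c : Char), ys.length ≤ xs.length →
    pvDiffBit (xs ++ [c]) ys = pvDiffBit xs ys := by
  induction xs with
  | nil =>
    intro ys c h
    have : ys = [] := by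
      cases ys
      · rfl
      · simp at h
    subst this
    simp [pvDiffBit]
  | cons x xs ih =>
    intro ys c h
    match ys with
    | [] => simp [pvDiffBit]
    | y :: ys =>
      simp at h
      simp only [List.cons_append]
      by_cases hxy : x = y
      · subst hxy; rw [diffBit_cons, diffBit_cons, ih ys c h]
      · rw [diffBit_cons_ne _ _ hxy, diffBit_cons_ne _ _ hxy, ih ys c h]
lemma diff_pos (W u v : Nat) (hu : max 17 (pvBitLen u) = W) (hv : max 17 (pvBitLen v) = W) :
    pvDiffBit (pvABit (u : Int)) (pvABit (v : Int)) = (cnt W u v : Int) := by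
  rw [zfill_nonneg, zfill_nonneg, hu, hv]
  exact diffBit_fix W u v
    (lt_of_lt_of_le (lt_two_pow_pvBitLen u) (Nat.pow_le_pow_right (by norm_num) (by omega)))
    (lt_of_lt_of_le (lt_two_pow_pvBitLen v) (Nat.pow_le_pow_right (by norm_num) (by omega)))
lemma diff_neg (W u v : Nat) (hu0 : 0 < u) (hv0 : 0 < v)
    (hu : max 16 (pvBitLen u) = W) (hv : max 16 (pvBitLen v) = W) :
    pvDiffBit (pvABit (-(u : Int))) (pvABit (-(v : Int))) = (cnt W u v : Int) := by
  rw [zfill_neg u hu0, zfill_neg v hv0, hu, hv, diffBit_cons]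
  exact diffBit_fix W u v
    (lt_of_lt_of_le (lt_two_pow_pvBitLen u) (Nat.pow_le_pow_right (by norm_num) (by omega)))
    (lt_of_lt_of_le (lt_two_pow_pvBitLen v) (Nat.pow_le_pow_right (by norm_num) (by omega)))
lemma cnt_comm (w : Nat) : ∀ u v, cnt w u v = cnt w v u := by
  induction w with
  | zero => intro u v; rfl
  | succ w ih =>
    intro u v
    rw [cnt, cnt, ih (u / 2)]
    congr 1
    by_cases h : u % 2 = v % 2
    · rw [if_pos h, if_pos h.symm]
    · rw [if_neg h, if_neg (fun hh => h hh.symm)]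
lemma cnt_self (w : Nat) : ∀ b, cnt w b b = 0 := by
  induction w with
  | zero => intro b; rfl
  | succ w ih => intro b; rw [cnt, if_pos rfl, ih]
lemma cnt_split (s : Nat) : ∀ w a b c d, a < 2 ^ s → c < 2 ^ s →
    cnt (s + w) (a + 2 ^ s * b) (c + 2 ^ s * d) = cnt s a c + cnt w b d := by
  induction s with
  | zero =>
    intro w a b c d ha hc
    have ha0 : a = 0 := by simpa using ha
    have hc0 : c = 0 := by simpa using hc
    subst ha0; subst hc0
    simp [cnt]
  | succ s ih =>
    intro w a b c d ha hc
    have hb : 2 ^ (s + 1) * b = 2 * (2 ^ s * b) := by ring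
    have hd' : 2 ^ (s + 1) * d = 2 * (2 ^ s * d) := by ring
    have e1 : a + 2 ^ (s + 1) * b = (a % 2) + 2 * (a / 2 + 2 ^ s * b) := by
      rw [hb]
      omega
    have e2 : c + 2 ^ (s + 1) * d = (c % 2) + 2 * (c / 2 + 2 ^ s * d) := by
      rw [hd']
      omega
    have hs : s + 1 + w = (s + w) + 1 := by omega
    rw [hs, cnt, cnt]
    have m1 : (a + 2 ^ (s + 1) * b) % 2 = a % 2 := by rw [e1]; omega
    have m2 : (c + 2 ^ (s + 1) * d) % 2 = c % 2 := by rw [e2]; omega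
    have d1 : (a + 2 ^ (s + 1) * b) / 2 = a / 2 + 2 ^ s * b := by rw [e1]; omega
    have d2 : (c + 2 ^ (s + 1) * d) / 2 = c / 2 + 2 ^ s * d := by rw [e2]; omega
    rw [m1, m2, d1, d2,
      ih w (a / 2) b (c / 2) d (by rw [pow_succ] at ha; omega) (by rw [pow_succ] at hc; omega)]
    omega
lemma ones_le (w : Nat) : ∀ r, cnt w r 0 ≤ w := by
  induction w with
  | zero => intro r; exact le_rfl
  | succ w ih =>
    intro r
    rw [cnt]
    have := ih (r / 2)
    simp only [Nat.zero_div]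
    split <;> omega
lemma ones_pow_sub_one (w : Nat) : ∀ k, k ≤ w → cnt w (2 ^ k - 1) 0 = k := by
  induction w with
  | zero => intro k hk; interval_cases k; rfl
  | succ w ih =>
    intro k hk
    by_cases h0 : k = 0
    · subst h0; simpa using cnt_self (w + 1) 0
    · rw [cnt]
      have he : 2 ^ k = 2 * 2 ^ (k - 1) := by
        calc 2 ^ k = 2 ^ ((k - 1) + 1) := by congr 1; omega
        _ = 2 * 2 ^ (k - 1) := by rw [pow_succ]; ring
      have h1 : 1 ≤ 2 ^ (k - 1) := Nat.one_le_two_pow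
      have hm : ¬ (2 ^ k - 1) % 2 = 0 % 2 := by omega
      have hd : (2 ^ k - 1) / 2 = 2 ^ (k - 1) - 1 := by omega
      rw [if_neg hm, hd]
      simp only [Nat.zero_div]
      rw [ih (k - 1) (by omega)]
      omega
lemma ones_lt (w : Nat) : ∀ r, r < 2 ^ w - 1 → cnt w r 0 < w := by
  induction w with
  | zero => intro r h; simp at h
  | succ w ih =>
    intro r h
    rw [cnt]
    simp only [Nat.zero_div]
    by_cases hr : r / 2 < 2 ^ w - 1
    · have := ih (r / 2) hr
      split <;> omega
    · have hr2 : r / 2 = 2 ^ w - 1 := by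
        rw [pow_succ] at h
        have h1 : 1 ≤ 2 ^ w := Nat.one_le_two_pow
        omega
      have hrm : r % 2 = 0 := by
        rw [pow_succ] at h
        have h1 : 1 ≤ 2 ^ w := Nat.one_le_two_pow
        omega
      rw [if_pos (by omega : r % 2 = 0 % 2)]
      have := ones_le w (r / 2)
      have h1 : 1 ≤ 2 ^ w := Nat.one_le_two_pow
      omega
lemma ones_pos (w : Nat) : ∀ r, 1 ≤ r → r < 2 ^ w → 1 ≤ cnt w r 0 := by
  induction w with
  | zero => intro r h1 h2; simp at h2; omega
  | succ w ih =>
    intro r h1 h2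
    rw [cnt]
    simp only [Nat.zero_div]
    by_cases hm : r % 2 = 0
    · have hr1 : 1 ≤ r / 2 := by omega
      have hr2 : r / 2 < 2 ^ w := by rw [pow_succ] at h2; omega
      have := ih (r / 2) hr1 hr2
      split <;> omega
    · rw [if_neg (by omega : ¬ r % 2 = 0 % 2)]
      omega
lemma cnt_allones (w : Nat) : ∀ r, cnt w (2 ^ w - 1) r = w - cnt w r 0 := by
  induction w with
  | zero => intro r; rfl
  | succ w ih =>
    intro r
    rw [cnt, cnt]
    have h1 : 1 ≤ 2 ^ w := Nat.one_le_two_pow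
    have hm : (2 ^ (w + 1) - 1) % 2 = 1 := by rw [pow_succ]; omega
    have hd : (2 ^ (w + 1) - 1) / 2 = 2 ^ w - 1 := by rw [pow_succ]; omega
    rw [hm, hd, ih (r / 2)]
    have hle := ones_le w (r / 2)
    simp only [Nat.zero_div]
    by_cases hr : r % 2 = 0
    · rw [if_neg (by omega : ¬ (1 : Nat) = r % 2), if_pos (by omega : r % 2 = 0 % 2)]
      omega
    · rw [if_pos (by omega : (1 : Nat) = r % 2), if_neg (by omega : ¬ r % 2 = 0 % 2)]
      omega

-- the low-window values of cnt that drive the scan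
lemma cnt_width_eq (w w' a a' b b' : Nat) (hw : w = w') (ha : a = a') (hb : b = b') :
    cnt w a b = cnt w' a' b' := by rw [hw, ha, hb]

lemma inner_pos_hit (u : Nat) :
    cnt (u + 2 + 1) (2 ^ (u + 2) - 1) (2 ^ (u + 2) - 1 + 2 ^ (u + 1)) = 2 := by
  have hB : 2 ^ (u + 2) = 2 * 2 ^ (u + 1) := by rw [pow_succ]; ring
  have hA : 1 ≤ 2 ^ (u + 1) := Nat.one_le_two_pow
  have hw : cnt (u + 2 + 1) (2 ^ (u + 2) - 1) (2 ^ (u + 2) - 1 + 2 ^ (u + 1))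
      = cnt (u + 2 + 1) ((2 ^ (u + 2) - 1) + 2 ^ (u + 2) * 0) ((2 ^ (u + 1) - 1) + 2 ^ (u + 2) * 1) :=
    cnt_width_eq _ _ _ _ _ _ rfl (by omega) (by omega)
  rw [hw, cnt_split (u + 2) 1 _ _ _ _ (by omega) (by omega),
    cnt_allones (u + 2) (2 ^ (u + 1) - 1), ones_pow_sub_one (u + 2) (u + 1) (by omega)]
  have h01 : cnt 1 0 1 = 1 := rfl
  omega

lemma inner_pos_miss (u j : Nat) (hj1 : 1 ≤ j) (hj2 : j < 2 ^ (u + 1)) :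
    3 ≤ cnt (u + 2 + 1) (2 ^ (u + 2) - 1) (2 ^ (u + 2) - 1 + j) := by
  have hB : 2 ^ (u + 2) = 2 * 2 ^ (u + 1) := by rw [pow_succ]; ring
  have hA : 1 ≤ 2 ^ (u + 1) := Nat.one_le_two_pow
  have hw : cnt (u + 2 + 1) (2 ^ (u + 2) - 1) (2 ^ (u + 2) - 1 + j)
      = cnt (u + 2 + 1) ((2 ^ (u + 2) - 1) + 2 ^ (u + 2) * 0) ((j - 1) + 2 ^ (u + 2) * 1) :=
    cnt_width_eq _ _ _ _ _ _ rfl (by omega) (by omega)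
  rw [hw, cnt_split (u + 2) 1 _ _ _ _ (by omega) (by omega), cnt_allones (u + 2) (j - 1)]
  have hones : cnt (u + 2) (j - 1) 0 ≤ u := by
    have hw2 : cnt (u + 2) (j - 1) 0
        = cnt (u + 1 + 1) ((j - 1) + 2 ^ (u + 1) * 0) (0 + 2 ^ (u + 1) * 0) :=
      cnt_width_eq _ _ _ _ _ _ rfl (by omega) (by omega)
    rw [hw2, cnt_split (u + 1) 1 _ _ _ _ (by omega) (by omega)]
    have hlt : cnt (u + 1) (j - 1) 0 < u + 1 := ones_lt (u + 1) (j - 1) (by omega)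
    have hz : cnt 1 0 0 = 0 := rfl
    omega
  have h01 : cnt 1 0 1 = 1 := rfl
  have := ones_le (u + 2) (j - 1)
  omega

lemma inner_neg_hit (u : Nat) :
    cnt (u + 2 + 1) (2 ^ (u + 2)) (2 ^ (u + 1)) = 2 := by
  have hB : 2 ^ (u + 2) = 2 * 2 ^ (u + 1) := by rw [pow_succ]; ring
  have hA : 1 ≤ 2 ^ (u + 1) := Nat.one_le_two_pow
  have hw : cnt (u + 2 + 1) (2 ^ (u + 2)) (2 ^ (u + 1))
      = cnt (u + 2 + 1) (0 + 2 ^ (u + 2) * 1) ((2 ^ (u + 1)) + 2 ^ (u + 2) * 0) :=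
    cnt_width_eq _ _ _ _ _ _ rfl (by omega) (by omega)
  rw [hw, cnt_split (u + 2) 1 _ _ _ _ (by omega) (by omega)]
  have hinner : cnt (u + 2) 0 (2 ^ (u + 1)) = 1 := by
    rw [cnt_comm]
    have hw2 : cnt (u + 2) (2 ^ (u + 1)) 0
        = cnt (u + 1 + 1) (0 + 2 ^ (u + 1) * 1) (0 + 2 ^ (u + 1) * 0) :=
      cnt_width_eq _ _ _ _ _ _ rfl (by omega) (by omega)
    rw [hw2, cnt_split (u + 1) 1 _ _ _ _ (by omega) (by omega), cnt_self]
    rfl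
  rw [hinner]
  rfl

lemma inner_neg_miss (u j : Nat) (hj1 : 1 ≤ j) (hj2 : j < 2 ^ (u + 1)) :
    3 ≤ cnt (u + 2 + 1) (2 ^ (u + 2)) (2 ^ (u + 2) - j) := by
  have hB : 2 ^ (u + 2) = 2 * 2 ^ (u + 1) := by rw [pow_succ]; ring
  have hA : 1 ≤ 2 ^ (u + 1) := Nat.one_le_two_pow
  have hw : cnt (u + 2 + 1) (2 ^ (u + 2)) (2 ^ (u + 2) - j)
      = cnt (u + 2 + 1) (0 + 2 ^ (u + 2) * 1) ((2 ^ (u + 2) - j) + 2 ^ (u + 2) * 0) :=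
    cnt_width_eq _ _ _ _ _ _ rfl (by omega) (by omega)
  rw [hw, cnt_split (u + 2) 1 _ _ _ _ (by omega) (by omega)]
  have hmain : 2 ≤ cnt (u + 2) 0 (2 ^ (u + 2) - j) := by
    rw [cnt_comm]
    have hw2 : cnt (u + 2) (2 ^ (u + 2) - j) 0
        = cnt (u + 1 + 1) ((2 ^ (u + 1) - j) + 2 ^ (u + 1) * 1) (0 + 2 ^ (u + 1) * 0) :=
      cnt_width_eq _ _ _ _ _ _ rfl (by omega) (by omega)
    rw [hw2, cnt_split (u + 1) 1 _ _ _ _ (by omega) (by omega)]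
    have hp := ones_pos (u + 1) (2 ^ (u + 1) - j) (by omega) (by omega)
    have h10 : cnt 1 1 0 = 1 := rfl
    omega
  have h10 : cnt 1 1 0 = 1 := rfl
  omega


lemma loopA_eq (a : List Char) : ∀ (δ f : Nat) (n : Int), 1 ≤ δ → δ ≤ f →
    pvDiffBit a (pvABit (n + δ)) ≤ 2 →
    (∀ j : Nat, 1 ≤ j → j < δ → ¬ pvDiffBit a (pvABit (n + j)) ≤ 2) →
    pvLoopA f a n = n + δ := by
  intro δ
  induction δ with
  | zero => intro f n h1; omega
  | succ δ ih =>
    intro f n _ hf hhit hmiss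
    match f, hf with
    | f + 1, _ =>
      rw [pvLoopA]
      by_cases hδ : δ = 0
      · subst hδ
        rw [if_pos (by simpa using hhit)]
        simp
      · rw [if_neg (by
          have := hmiss 1 le_rfl (by omega)
          simpa using this)]
        have := ih f (n + 1) (by omega) (by omega)
          (by
            have he : n + 1 + (δ : Int) = n + ((δ + 1 : Nat) : Int) := by push_cast; ring
            rw [he]
            exact hhit)
          (by
            intro j hj1 hj2
            have he : n + 1 + (j : Int) = n + ((j + 1 : Nat) : Int) := by push_cast; ring
            rw [he]
            exact hmiss (j + 1) (by omega) (by omega))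
        rw [this]
        push_cast
        ring
lemma exists_odd_mul (x : Nat) (hx : 0 < x) : ∃ t c, c % 2 = 1 ∧ x = c * 2 ^ t := by
  induction x using Nat.strong_induction_on with
  | _ x ih =>
    by_cases h : x % 2 = 1
    · exact ⟨0, x, h, by simp⟩
    · have hx2 : 0 < x / 2 := by omega
      obtain ⟨t, c, hc, he⟩ := ih (x / 2) (by omega) hx2
      refine ⟨t + 1, c, hc, ?_⟩
      have he2 : c * 2 ^ (t + 1) = 2 * (c * 2 ^ t) := by ring
      omega

-- the data of A's scan: δ is hit, everything before misses; and δ is one of B's steps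
def GoodDelta (n : Int) (δ : Nat) : Prop :=
  1 ≤ δ ∧ δ ≤ 2 ^ 30 ∧ ((δ : Nat) : Int) ∈ pvSteps ∧
  pvDiffBit (pvABit n) (pvABit (n + (δ : Nat))) ≤ 2 ∧
  (∀ j : Nat, 1 ≤ j → j < δ → ¬ pvDiffBit (pvABit n) (pvABit (n + (j : Nat))) ≤ 2)

lemma mem_steps_pow (j : Nat) (hj : j ≤ 32) : (((2 : Nat) ^ j : Nat) : Int) ∈ pvSteps := by
  unfold pvSteps
  rcases Nat.lt_or_ge j 2 with h | h
  · interval_cases j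
    · simp
    · simp
  · apply List.mem_append_right
    refine List.mem_flatMap.mpr ⟨j - 2, List.mem_range.mpr (by omega), ?_⟩
    have he : (((2 : Nat) ^ j : Nat) : Int) = 2 ^ (j - 2 + 2) := by
      push_cast
      congr 1
      omega
    simp [he]

lemma mem_steps_one : ((1 : Nat) : Int) ∈ pvSteps := by
  simpa using mem_steps_pow 0 (by omega)

lemma mem_steps_pow_sub (j : Nat) (h2 : 2 ≤ j) (hj : j ≤ 32) :
    (((2 ^ j - 1 : Nat)) : Int) ∈ pvSteps := by
  unfold pvSteps
  apply List.mem_append_right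
  refine List.mem_flatMap.mpr ⟨j - 2, List.mem_range.mpr (by omega), ?_⟩
  have h1 : 1 ≤ (2 : Nat) ^ j := Nat.one_le_two_pow
  have he : (((2 ^ j - 1 : Nat)) : Int) = 2 ^ (j - 2 + 2) - 1 := by
    have hp : (((2 : Nat) ^ j : Nat) : Int) = 2 ^ (j - 2 + 2) := by
      push_cast
      congr 1
      omega
    omega
  simp [he]

lemma steps_sorted : pvSteps.Pairwise (· < ·) := by decide

lemma steps_pos : ∀ s ∈ pvSteps, 1 ≤ s := by decide

lemma find_first (P : Int → Bool) (d : Int) : ∀ l : List Int, l.Pairwise (· < ·) → d ∈ l →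
    P d = true → (∀ s ∈ l, s < d → P s = false) → l.find? P = some d := by
  intro l
  induction l with
  | nil =>
    intro _ hd
    simp at hd
  | cons s rest ih =>
    intro hp hd hPd hprev
    have hpc := List.pairwise_cons.mp hp
    by_cases hs : P s = true
    · have hsd : s = d := by
        rcases List.mem_cons.mp hd with h | h
        · omega
        · exfalso
          have hlt : s < d := hpc.1 d h
          have := hprev s (List.mem_cons_self) hlt
          rw [this] at hs
          exact Bool.false_ne_true hs
      rw [List.find?_cons_of_pos hs, hsd]
    · rw [List.find?_cons_of_neg hs]
      have hd' : d ∈ rest := by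
        rcases List.mem_cons.mp hd with h | h
        · exfalso
          rw [h] at hPd
          exact hs hPd
        · exact h
      exact ih hpc.2 hd' hPd (fun x hx hlt => hprev x (List.mem_cons_of_mem _ hx) hlt)

lemma B_of_good (n : Int) (δ : Nat) (hg : GoodDelta n δ) :
    pvFindStep n = some ((δ : Nat) : Int) := by
  obtain ⟨hδ1, hδle, hmem, hhit, hmiss⟩ := hg
  unfold pvFindStep
  apply find_first _ _ _ steps_sorted hmem
  · simp only [decide_eq_true_eq]
    exact hhit
  · intro s hs hlt
    have hs1 : 1 ≤ s := steps_pos s hs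
    have hj : s = ((s.toNat : Nat) : Int) := by omega
    simp only [decide_eq_false_iff_not]
    rw [hj]
    exact hmiss s.toNat (by omega) (by omega)

lemma A_of_good (n : Int) (δ : Nat) (hg : GoodDelta n δ) :
    pvLoopA 2147483648 (pvABit n) n = n + (δ : Nat) := by
  obtain ⟨hδ1, hδle, _, hhit, hmiss⟩ := hg
  exact loopA_eq _ δ _ n hδ1
    (by
      have e30 : (2 : Nat) ^ 30 = 1073741824 := by norm_num
      omega)
    hhit hmiss

lemma good_pos (ν : Nat) (hub : ν ≤ 2 ^ 31)
    (hE : 17 ≤ pvBitLen ν → ν + 1 ≠ 2 ^ pvBitLen ν) :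
    ∃ δ : Nat, GoodDelta ((ν : Nat) : Int) δ := by
  obtain ⟨t, c, hc, hx⟩ := exists_odd_mul (ν + 1) (by omega)
  have hc1 : 1 ≤ c := by omega
  have hpt : 1 ≤ 2 ^ t := Nat.one_le_two_pow
  have hct : 2 ^ t ≤ c * 2 ^ t := Nat.le_mul_of_pos_left _ (by omega)
  set m := c / 2 with hm
  have hmdef : c = 2 * m + 1 := by omega
  have hF0 : ν = (2 ^ t - 1) + 2 ^ (t + 1) * m := by
    have e : c * 2 ^ t = 2 ^ (t + 1) * m + 2 ^ t := by
      calc c * 2 ^ t = (2 * m + 1) * 2 ^ t := by rw [← hmdef]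
      _ = (2 ^ t * 2) * m + 2 ^ t := by ring
      _ = 2 ^ (t + 1) * m + 2 ^ t := by rw [← pow_succ]
    omega
  have hB21 : 2 ^ (t + 1) = 2 * 2 ^ t := by rw [pow_succ]; ring
  have ht31 : t ≤ 31 := by
    by_contra h
    have h32 : 2 ^ 32 ≤ 2 ^ t := Nat.pow_le_pow_right (by norm_num) (by omega)
    have e1 : (2 : Nat) ^ 32 = 4294967296 := by norm_num
    have e2 : (2 : Nat) ^ 31 = 2147483648 := by norm_num
    omega
  set δ : Nat := if t = 0 then 1 else 2 ^ (t - 1) with hδ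
  have hδ1 : 1 ≤ δ := by
    rw [hδ]; split
    · omega
    · exact Nat.one_le_two_pow
  have hδle : δ ≤ 2 ^ 30 := by
    rw [hδ]; split
    · norm_num
    · exact Nat.pow_le_pow_right (by norm_num) (by omega)
  have hlow : 2 ^ t - 1 + δ < 2 ^ (t + 1) := by
    rw [hδ]; split
    · omega
    · rename_i h0
      have h2t : 2 ^ t = 2 * 2 ^ (t - 1) := by
        calc 2 ^ t = 2 ^ ((t - 1) + 1) := by congr 1; omega
        _ = 2 * 2 ^ (t - 1) := by rw [pow_succ]; ring
      have : 1 ≤ 2 ^ (t - 1) := Nat.one_le_two_pow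
      omega
  set W := max 17 (pvBitLen ν) with hW
  have hbound : ν + δ < 2 ^ W := by
    by_cases hL : pvBitLen ν ≤ 16
    · have hW17 : W = 17 := by rw [hW]; omega
      have hν16 : ν < 2 ^ 16 := (pvBitLen_le_iff 16 ν).mp hL
      have ht16 : t ≤ 16 := by
        by_contra hh
        have h17 : 2 ^ 17 ≤ 2 ^ t := Nat.pow_le_pow_right (by norm_num) (by omega)
        have e1 : (2 : Nat) ^ 17 = 131072 := by norm_num
        have e2 : (2 : Nat) ^ 16 = 65536 := by norm_num
        omega
      have hδ15 : δ ≤ 2 ^ 15 := by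
        rw [hδ]; split
        · norm_num
        · exact Nat.pow_le_pow_right (by norm_num) (by omega)
      have e15 : (2 : Nat) ^ 15 = 32768 := by norm_num
      have e16 : (2 : Nat) ^ 16 = 65536 := by norm_num
      have e17 : (2 : Nat) ^ 17 = 131072 := by norm_num
      rw [hW17]
      omega
    · have hL17 : 17 ≤ pvBitLen ν := by omega
      have hWL : W = pvBitLen ν := by rw [hW]; omega
      have hνlt : ν < 2 ^ pvBitLen ν := lt_two_pow_pvBitLen ν
      have hne : ν + 1 ≠ 2 ^ pvBitLen ν := hE hL17
      have htL : t ≤ pvBitLen ν := by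
        by_contra hh
        have hlt : 2 ^ pvBitLen ν < 2 ^ t := Nat.pow_lt_pow_right (by norm_num) (by omega)
        omega
      by_cases ht0 : t = 0
      · have hδe : δ = 1 := by rw [hδ, if_pos ht0]
        rw [hWL]
        omega
      · have hδe : δ = 2 ^ (t - 1) := by rw [hδ, if_neg ht0]
        have hq : 2 ^ (pvBitLen ν - t) * 2 ^ t = 2 ^ pvBitLen ν := by
          rw [← pow_add]; congr 1; omega
        have hq1 : 1 ≤ 2 ^ (pvBitLen ν - t) := Nat.one_le_two_pow
        have hcq : c ≤ 2 ^ (pvBitLen ν - t) := by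
          by_contra hh
          have h1 : (2 ^ (pvBitLen ν - t) + 1) * 2 ^ t ≤ c * 2 ^ t :=
            Nat.mul_le_mul_right _ (by omega)
          have h2 : (2 ^ (pvBitLen ν - t) + 1) * 2 ^ t = 2 ^ (pvBitLen ν - t) * 2 ^ t + 2 ^ t := by
            ring
          omega
        have hcq2 : c ≠ 2 ^ (pvBitLen ν - t) := by
          intro hh
          apply hne
          rw [hx, hh]
          exact hq
        have hmul : c * 2 ^ t ≤ (2 ^ (pvBitLen ν - t) - 1) * 2 ^ t :=
          Nat.mul_le_mul_right _ (by omega)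
        have hd : (2 ^ (pvBitLen ν - t) - 1) * 2 ^ t + 2 ^ t = 2 ^ (pvBitLen ν - t) * 2 ^ t := by
          calc (2 ^ (pvBitLen ν - t) - 1) * 2 ^ t + 2 ^ t
              = ((2 ^ (pvBitLen ν - t) - 1) + 1) * 2 ^ t := by ring
          _ = 2 ^ (pvBitLen ν - t) * 2 ^ t := by congr 1; omega
        have h2t : 2 ^ t = 2 * 2 ^ (t - 1) := by
          calc 2 ^ t = 2 ^ ((t - 1) + 1) := by congr 1; omega
          _ = 2 * 2 ^ (t - 1) := by rw [pow_succ]; ring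
        rw [hWL]
        omega
  have halign : ∀ j : Nat, j ≤ δ → max 17 (pvBitLen (ν + j)) = W := by
    intro j hj
    have hbl1 : pvBitLen ν ≤ pvBitLen (ν + j) := pvBitLen_mono (by omega)
    have hbl2 : pvBitLen (ν + j) ≤ W := (pvBitLen_le_iff W (ν + j)).mpr (by omega)
    have h17 : 17 ≤ W := le_max_left _ _
    have hbl0 : pvBitLen ν ≤ W := le_max_right _ _
    omega
  have hdiff : ∀ j : Nat, 1 ≤ j → j ≤ δ →
      pvDiffBit (pvABit (ν : Int)) (pvABit ((ν : Int) + (j : Nat))) =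
        (cnt (t + 1) (2 ^ t - 1) (2 ^ t - 1 + j) : Int) := by
    intro j hj1 hjδ
    have hcast : (ν : Int) + (j : Nat) = ((ν + j : Nat) : Int) := by push_cast; ring
    rw [hcast, diff_pos W ν (ν + j) (by simpa using halign 0 (by omega)) (halign j hjδ)]
    have hsp := cnt_split (t + 1) (W - (t + 1)) (2 ^ t - 1) m (2 ^ t - 1 + j) m
      (by omega) (by omega)
    have hWt : t + 1 ≤ W := by
      by_cases hm0 : m = 0
      · have hν : ν = 2 ^ t - 1 := by rw [hF0, hm0]; omega
        by_cases ht16 : t ≤ 16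
        · have h17 : 17 ≤ W := le_max_left _ _
          omega
        · exfalso
          have h2t : 2 ^ t = 2 * 2 ^ (t - 1) := by
            calc 2 ^ t = 2 ^ ((t - 1) + 1) := by congr 1; omega
            _ = 2 * 2 ^ (t - 1) := by rw [pow_succ]; ring
          have hp1 : 1 ≤ 2 ^ (t - 1) := Nat.one_le_two_pow
          have hblν : pvBitLen ν = t := by
            have hle : pvBitLen ν ≤ t := (pvBitLen_le_iff t ν).mpr (by omega)
            have hgt : ¬ pvBitLen ν ≤ t - 1 := by
              rw [pvBitLen_le_iff]
              omega
            omega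
          exact hE (by omega) (by rw [hblν]; omega)
      · have hge : 2 ^ (t + 1) ≤ 2 ^ (t + 1) * m := Nat.le_mul_of_pos_right _ (by omega)
        have hgt : ¬ pvBitLen ν ≤ t + 1 := by
          rw [pvBitLen_le_iff]
          omega
        have hble : pvBitLen ν ≤ W := le_max_right _ _
        omega
    have hweq : cnt W ν (ν + j) =
        cnt ((t + 1) + (W - (t + 1))) ((2 ^ t - 1) + 2 ^ (t + 1) * m)
          ((2 ^ t - 1 + j) + 2 ^ (t + 1) * m) :=
      cnt_width_eq _ _ _ _ _ _ (by omega) (by omega) (by omega)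
    rw [hweq, hsp, cnt_self]
    norm_num
  refine ⟨δ, hδ1, hδle, ?_, ?_, ?_⟩
  · rw [hδ]
    split
    · exact mem_steps_one
    · exact mem_steps_pow (t - 1) (by omega)
  · rw [hdiff δ hδ1 le_rfl]
    by_cases ht0 : t = 0
    · subst ht0
      have hδe : δ = 1 := by rw [hδ]; rfl
      rw [hδe]
      decide
    · by_cases ht1 : t = 1
      · subst ht1
        have hδe : δ = 1 := by rw [hδ]; rfl
        rw [hδe]
        decide
      · obtain ⟨u, rfl⟩ : ∃ u, t = u + 2 := ⟨t - 2, by omega⟩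
        have hδe : δ = 2 ^ (u + 1) := by rw [hδ]; rfl
        rw [hδe]
        rw [inner_pos_hit u]
        norm_num
  · intro j hj1 hj2
    have ht2 : 2 ≤ t := by
      by_contra hh
      have : δ = 1 := by
        rw [hδ]
        interval_cases t <;> rfl
      omega
    obtain ⟨u, rfl⟩ : ∃ u, t = u + 2 := ⟨t - 2, by omega⟩
    have hδe : δ = 2 ^ (u + 1) := by rw [hδ]; rfl
    rw [hdiff j hj1 (by omega)]
    have h3 := inner_pos_miss u j hj1 (by omega)
    intro hcon
    have : ((cnt (u + 2 + 1) (2 ^ (u + 2) - 1) (2 ^ (u + 2) - 1 + j) : Nat) : Int) ≤ 2 := hcon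
    have : (cnt (u + 2 + 1) (2 ^ (u + 2) - 1) (2 ^ (u + 2) - 1 + j) : Nat) ≤ 2 := by
      exact_mod_cast this
    omega
lemma good_neg (μ : Nat) (h1 : 1 ≤ μ) (hub : μ ≤ 2 ^ 31)
    (hE : ∀ k, 16 ≤ k → μ ≠ 2 ^ k) :
    ∃ δ : Nat, GoodDelta (-((μ : Nat) : Int)) δ := by
  obtain ⟨t, c, hc, hx⟩ := exists_odd_mul μ (by omega)
  have hc1 : 1 ≤ c := by omega
  have hpt : 1 ≤ 2 ^ t := Nat.one_le_two_pow
  have hct : 2 ^ t ≤ c * 2 ^ t := Nat.le_mul_of_pos_left _ (by omega)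
  set m := c / 2 with hm
  have hmdef : c = 2 * m + 1 := by omega
  have hF0 : μ = 2 ^ t + 2 ^ (t + 1) * m := by
    have e : c * 2 ^ t = 2 ^ (t + 1) * m + 2 ^ t := by
      calc c * 2 ^ t = (2 * m + 1) * 2 ^ t := by rw [← hmdef]
      _ = (2 ^ t * 2) * m + 2 ^ t := by ring
      _ = 2 ^ (t + 1) * m + 2 ^ t := by rw [← pow_succ]
    omega
  have hB21 : 2 ^ (t + 1) = 2 * 2 ^ t := by rw [pow_succ]; ring
  have ht31 : t ≤ 31 := by
    by_contra h
    have h32 : 2 ^ 32 ≤ 2 ^ t := Nat.pow_le_pow_right (by norm_num) (by omega)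
    have e1 : (2 : Nat) ^ 32 = 4294967296 := by norm_num
    have e2 : (2 : Nat) ^ 31 = 2147483648 := by norm_num
    omega
  set δ : Nat := if t = 0 then 1 else 2 ^ (t - 1) with hδ
  have hδ1 : 1 ≤ δ := by
    rw [hδ]; split
    · omega
    · exact Nat.one_le_two_pow
  have hδle : δ ≤ 2 ^ 30 := by
    rw [hδ]; split
    · norm_num
    · exact Nat.pow_le_pow_right (by norm_num) (by omega)
  have h2t1 : t ≠ 0 → 2 ^ t = 2 * 2 ^ (t - 1) := by
    intro h0
    calc 2 ^ t = 2 ^ ((t - 1) + 1) := by congr 1; omega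
    _ = 2 * 2 ^ (t - 1) := by rw [pow_succ]; ring
  have hδt : 2 * δ ≤ 2 ^ (t + 1) := by
    rw [hδ]; split
    · omega
    · rename_i h0
      have := h2t1 h0
      omega
  by_cases hμ1 : μ = 1
  · subst hμ1
    have ht0 : t = 0 := by
      by_contra h0
      have := h2t1 h0
      have : 2 ≤ 2 ^ t := by omega
      omega
    subst ht0
    have hδe : δ = 1 := by rw [hδ]; rfl
    refine ⟨δ, hδ1, hδle, ?_, ?_, ?_⟩
    · rw [hδe]
      exact mem_steps_one
    · rw [hδe]
      decide
    · intro j hj1 hj2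
      rw [hδe] at hj2
      omega
  · -- μ ≥ 2
    have hμ2 : 2 ≤ μ := by omega
    have hsub : ∀ j : Nat, j ≤ δ → 1 ≤ μ - j ∧ j ≤ μ := by
      intro j hj
      constructor
      · rw [hδ] at hj
        by_cases h0 : t = 0
        · rw [if_pos h0] at hj; omega
        · rw [if_neg h0] at hj
          have := h2t1 h0
          omega
      · rw [hδ] at hj
        by_cases h0 : t = 0
        · rw [if_pos h0] at hj; omega
        · rw [if_neg h0] at hj
          have := h2t1 h0
          omega
    set W := max 16 (pvBitLen μ) with hW
    have hdown : 2 ^ W - 2 ^ W ≤ 0 := by omega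
    have hμlt : μ < 2 ^ pvBitLen μ := lt_two_pow_pvBitLen μ
    have halign : ∀ j : Nat, j ≤ δ → max 16 (pvBitLen (μ - j)) = W := by
      intro j hj
      have hbl2 : pvBitLen (μ - j) ≤ pvBitLen μ := pvBitLen_mono (by omega)
      by_cases hL : pvBitLen μ ≤ 16
      · have h16 : 16 ≤ W := le_max_left _ _
        have hbl0 : pvBitLen μ ≤ W := le_max_right _ _
        omega
      · have hL17 : 17 ≤ pvBitLen μ := by omega
        have hWL : W = pvBitLen μ := by rw [hW]; omega
        have hne : μ ≠ 2 ^ (pvBitLen μ - 1) := hE (pvBitLen μ - 1) (by omega)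
        have hge : 2 ^ (pvBitLen μ - 1) ≤ μ := by
          by_contra hh
          have : pvBitLen μ ≤ pvBitLen μ - 1 := (pvBitLen_le_iff _ _).mpr (by omega)
          omega
        have hlow2 : 2 ^ (pvBitLen μ - 1) ≤ μ - δ := by
          by_cases h0 : t = 0
          · have hδe : δ = 1 := by rw [hδ, if_pos h0]
            omega
          · have hδe : δ = 2 ^ (t - 1) := by rw [hδ, if_neg h0]
            have h2t := h2t1 h0
            have htL : t ≤ pvBitLen μ - 1 := by
              by_contra hh
              have : 2 ^ pvBitLen μ ≤ 2 ^ t := Nat.pow_le_pow_right (by norm_num) (by omega)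
              omega
            have hq : 2 ^ (pvBitLen μ - 1 - t) * 2 ^ t = 2 ^ (pvBitLen μ - 1) := by
              rw [← pow_add]; congr 1; omega
            have hq1 : 1 ≤ 2 ^ (pvBitLen μ - 1 - t) := Nat.one_le_two_pow
            have hcq : 2 ^ (pvBitLen μ - 1 - t) ≤ c := by
              by_contra hh
              have hle : c ≤ 2 ^ (pvBitLen μ - 1 - t) - 1 := by omega
              have h1' : c * 2 ^ t ≤ (2 ^ (pvBitLen μ - 1 - t) - 1) * 2 ^ t :=
                Nat.mul_le_mul_right _ hle
              have h2' : (2 ^ (pvBitLen μ - 1 - t) - 1) * 2 ^ t + 2 ^ t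
                  = 2 ^ (pvBitLen μ - 1 - t) * 2 ^ t := by
                calc (2 ^ (pvBitLen μ - 1 - t) - 1) * 2 ^ t + 2 ^ t
                    = ((2 ^ (pvBitLen μ - 1 - t) - 1) + 1) * 2 ^ t := by ring
                _ = 2 ^ (pvBitLen μ - 1 - t) * 2 ^ t := by congr 1; omega
              omega
            have hcq2 : c ≠ 2 ^ (pvBitLen μ - 1 - t) := by
              intro hh
              apply hne
              calc μ = c * 2 ^ t := hx
              _ = 2 ^ (pvBitLen μ - 1 - t) * 2 ^ t := by rw [hh]
              _ = 2 ^ (pvBitLen μ - 1) := hq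
            have h1' : (2 ^ (pvBitLen μ - 1 - t) + 1) * 2 ^ t ≤ c * 2 ^ t :=
              Nat.mul_le_mul_right _ (by omega)
            have h2' : (2 ^ (pvBitLen μ - 1 - t) + 1) * 2 ^ t
                = 2 ^ (pvBitLen μ - 1 - t) * 2 ^ t + 2 ^ t := by ring
            omega
        have hblj : pvBitLen (μ - j) = pvBitLen μ := by
          have hmono : pvBitLen (μ - δ) ≤ pvBitLen (μ - j) := pvBitLen_mono (by omega)
          have : ¬ pvBitLen (μ - δ) ≤ pvBitLen μ - 1 := by
            rw [pvBitLen_le_iff]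
            omega
          omega
        rw [hblj, ← hWL, hW]
        omega
    have hWt : t + 1 ≤ W := by
      have hgt : ¬ pvBitLen μ ≤ t := by
        rw [pvBitLen_le_iff]
        omega
      have hble : pvBitLen μ ≤ W := le_max_right _ _
      omega
    have hdiff : ∀ j : Nat, 1 ≤ j → j ≤ δ →
        pvDiffBit (pvABit (-(μ : Int))) (pvABit (-(μ : Int) + (j : Nat))) =
          (cnt (t + 1) (2 ^ t) (2 ^ t - j) : Int) := by
      intro j hj1 hjδ
      obtain ⟨hs1, hs2⟩ := hsub j hjδ
      have hcast : -(μ : Int) + (j : Nat) = -(((μ - j : Nat)) : Int) := by omega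
      rw [hcast, diff_neg W μ (μ - j) (by omega) (by omega)
        (by simpa using halign 0 (by omega)) (halign j hjδ)]
      have hj2t : j ≤ 2 ^ t := by
        rw [hδ] at hjδ
        by_cases h0 : t = 0
        · rw [if_pos h0] at hjδ; omega
        · rw [if_neg h0] at hjδ
          have := h2t1 h0
          omega
      have hsp := cnt_split (t + 1) (W - (t + 1)) (2 ^ t) m (2 ^ t - j) m
        (by omega) (by omega)
      have hweq : cnt W μ (μ - j) =
          cnt ((t + 1) + (W - (t + 1))) (2 ^ t + 2 ^ (t + 1) * m)
            ((2 ^ t - j) + 2 ^ (t + 1) * m) :=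
        cnt_width_eq _ _ _ _ _ _ (by omega) (by omega) (by omega)
      rw [hweq, hsp, cnt_self]
      norm_num
    refine ⟨δ, hδ1, hδle, ?_, ?_, ?_⟩
    · rw [hδ]
      split
      · exact mem_steps_one
      · exact mem_steps_pow (t - 1) (by omega)
    · rw [hdiff δ hδ1 le_rfl]
      by_cases ht0 : t = 0
      · subst ht0
        have hδe : δ = 1 := by rw [hδ]; rfl
        rw [hδe]
        decide
      · by_cases ht1 : t = 1
        · subst ht1
          have hδe : δ = 1 := by rw [hδ]; rfl
          rw [hδe]
          decide
        · obtain ⟨u, rfl⟩ : ∃ u, t = u + 2 := ⟨t - 2, by omega⟩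
          have hδe : δ = 2 ^ (u + 1) := by rw [hδ]; rfl
          rw [hδe]
          have hBu : (2 : Nat) ^ (u + 2) = 2 * 2 ^ (u + 1) := by rw [pow_succ]; ring
          rw [show (2 : Nat) ^ (u + 2) - 2 ^ (u + 1) = 2 ^ (u + 1) from by
            have := Nat.one_le_two_pow (n := u + 1)
            omega]
          rw [inner_neg_hit u]
          norm_num
    · intro j hj1 hj2
      have ht2 : 2 ≤ t := by
        by_contra hh
        have : δ = 1 := by
          rw [hδ]
          interval_cases t <;> rfl
        omega
      obtain ⟨u, rfl⟩ : ∃ u, t = u + 2 := ⟨t - 2, by omega⟩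
      have hδe : δ = 2 ^ (u + 1) := by rw [hδ]; rfl
      rw [hdiff j hj1 (by omega)]
      have h3 := inner_neg_miss u j hj1 (by omega)
      intro hcon
      have h4 : (cnt (u + 2 + 1) (2 ^ (u + 2)) (2 ^ (u + 2) - j) : Nat) ≤ 2 := by
        exact_mod_cast hcon
      omega
-- helpers for the two misaligned (truncated-zip) boundary scans of A
lemma diffBit_comm (xs : List Char) : ∀ ys, pvDiffBit xs ys = pvDiffBit ys xs := by
  induction xs with
  | nil => intro ys; cases ys <;> simp [pvDiffBit]
  | cons x xs ih =>
    intro ys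
    cases ys with
    | nil => simp [pvDiffBit]
    | cons y ys =>
      by_cases h : x = y
      · subst h; rw [diffBit_cons, diffBit_cons, ih]
      · rw [diffBit_cons_ne _ _ h, diffBit_cons_ne _ _ (fun hh => h hh.symm), ih]

lemma fixM_id (x : Nat) : fixM (pvBitLen x) x = binStr x := by
  unfold fixM
  rw [binStr_length]
  simp

lemma pvABit_pos_big (x : Nat) (h : 17 ≤ pvBitLen x) : pvABit (x : Int) = binStr x := by
  rw [zfill_nonneg, show max 17 (pvBitLen x) = pvBitLen x from by omega, fixM_id]

lemma pvABit_neg_big (x : Nat) (h0 : 0 < x) (h : 16 ≤ pvBitLen x) :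
    pvABit (-(x : Int)) = '-' :: binStr x := by
  rw [zfill_neg x h0, show max 16 (pvBitLen x) = pvBitLen x from by omega, fixM_id]

lemma pvBitLen_eq_of (x L : Nat) (hlo : 2 ^ L ≤ x) (hhi : x < 2 ^ (L + 1)) :
    pvBitLen x = L + 1 := by
  have hle : pvBitLen x ≤ L + 1 := (pvBitLen_le_iff _ _).mpr hhi
  have hgt : ¬ pvBitLen x ≤ L := by rw [pvBitLen_le_iff]; omega
  omega

lemma binStr_step (x : Nat) (h : x ≠ 0) :
    binStr x = binStr (x / 2) ++ [Nat.digitChar (x % 2)] := by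
  rw [binStr, dif_neg h]

lemma ones_width (w w' r : Nat) (hr : r < 2 ^ w) (hww : w ≤ w') : cnt w' r 0 = cnt w r 0 := by
  have hweq : cnt w' r 0 = cnt (w + (w' - w)) (r + 2 ^ w * 0) (0 + 2 ^ w * 0) :=
    cnt_width_eq _ _ _ _ _ _ (by omega) (by omega) (by omega)
  rw [hweq, cnt_split w (w' - w) _ _ _ _ (by omega) (by omega), cnt_self]
  omega

lemma cnt_allones_sub (w : Nat) : ∀ v, v < 2 ^ w → cnt w (2 ^ w - 1) v = cnt w (2 ^ w - 1 - v) 0 := by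
  induction w with
  | zero => intro v hv; interval_cases v; rfl
  | succ w ih =>
    intro v hv
    have hB : 2 ^ (w + 1) = 2 * 2 ^ w := by rw [pow_succ]; ring
    have h1 : 1 ≤ 2 ^ w := Nat.one_le_two_pow
    rw [cnt, cnt]
    have hm1 : (2 ^ (w + 1) - 1) % 2 = 1 := by omega
    have hd1 : (2 ^ (w + 1) - 1) / 2 = 2 ^ w - 1 := by omega
    have hm2 : (2 ^ (w + 1) - 1 - v) % 2 = 1 - v % 2 := by omega
    have hd2 : (2 ^ (w + 1) - 1 - v) / 2 = 2 ^ w - 1 - v / 2 := by omega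
    rw [hm1, hd1, hm2, hd2, ih (v / 2) (by omega)]
    simp only [Nat.zero_div]
    by_cases hp : v % 2 = 0
    · rw [if_neg (by omega), if_neg (by omega)]
    · rw [if_pos (by omega), if_pos (by omega)]

lemma ones3 (k r w : Nat) (h1 : 3 * 2 ^ k < r) (h2 : r < 4 * 2 ^ k) (hw : k + 2 ≤ w) :
    3 ≤ cnt w r 0 := by
  have h4 : (4 : Nat) * 2 ^ k = 2 ^ (k + 2) := by rw [pow_succ, pow_succ]; ring
  have hwr : cnt w r 0 = cnt (k + 2) r 0 := ones_width (k + 2) w r (by omega) hw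
  have hsp : cnt (k + 2) r 0 = cnt k (r - 3 * 2 ^ k) 0 + cnt 2 3 0 := by
    have hweq : cnt (k + 2) r 0 = cnt (k + 2) ((r - 3 * 2 ^ k) + 2 ^ k * 3) (0 + 2 ^ k * 0) :=
      cnt_width_eq _ _ _ _ _ _ rfl (by omega) (by omega)
    rw [hweq, cnt_split k 2 _ _ _ _ (by omega) (by omega)]
  have hpos := ones_pos k (r - 3 * 2 ^ k) (by omega) (by omega)
  have h23 : cnt 2 3 0 = 2 := rfl
  omega

-- A's boundary case n = 2^L - 1, L ≥ 17: the scan compares a_bit against the first L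
-- characters of the longer b_bit (zip truncation), i.e. against bin(new / 2)
lemma good_posE (L : Nat) (h17 : 17 ≤ L) (h31 : L ≤ 31) :
    GoodDelta ((2 ^ L - 1 : Nat) : Int) (2 * 2 ^ (L - 3) - 1) := by
  have hP1 : 1 ≤ 2 ^ (L - 3) := Nat.one_le_two_pow
  have e2 : 2 ^ (L - 2) = 2 * 2 ^ (L - 3) := by
    calc 2 ^ (L - 2) = 2 ^ ((L - 3) + 1) := by congr 1; omega
    _ = 2 * 2 ^ (L - 3) := by rw [pow_succ]; ring
  have e1 : 2 ^ (L - 1) = 4 * 2 ^ (L - 3) := by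
    calc 2 ^ (L - 1) = 2 ^ ((L - 3) + 2) := by congr 1; omega
    _ = 4 * 2 ^ (L - 3) := by rw [pow_succ, pow_succ]; ring
  have e0 : 2 ^ L = 8 * 2 ^ (L - 3) := by
    calc 2 ^ L = 2 ^ ((L - 3) + 3) := by congr 1; omega
    _ = 8 * 2 ^ (L - 3) := by rw [pow_succ, pow_succ, pow_succ]; ring
  have eS : 2 ^ (L + 1) = 16 * 2 ^ (L - 3) := by rw [pow_succ, e0]; ring
  have e28 : (2 : Nat) ^ 28 = 268435456 := by norm_num
  have hPle : 2 ^ (L - 3) ≤ 2 ^ 28 := Nat.pow_le_pow_right (by norm_num) (by omega)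
  have hblν : pvBitLen (2 ^ L - 1) = L := by
    have := pvBitLen_eq_of (2 ^ L - 1) (L - 1) (by omega)
      (by rw [show L - 1 + 1 = L from by omega]; omega)
    omega
  have haν : pvABit ((2 ^ L - 1 : Nat) : Int) = binStr (2 ^ L - 1) :=
    pvABit_pos_big _ (by omega)
  have hdiff : ∀ j : Nat, 1 ≤ j → j ≤ 2 * 2 ^ (L - 3) - 1 →
      pvDiffBit (pvABit ((2 ^ L - 1 : Nat) : Int)) (pvABit (((2 ^ L - 1 : Nat) : Int) + (j : Nat))) =
        (cnt L (2 ^ L - 1 - (2 ^ L - 1 + j) / 2) 0 : Int) := by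
    intro j hj1 hj2
    have hcast : ((2 ^ L - 1 : Nat) : Int) + (j : Nat) = ((2 ^ L - 1 + j : Nat) : Int) := by
      push_cast
      ring
    have hm0 : 2 ^ L - 1 + j ≠ 0 := by omega
    have hblm : pvBitLen (2 ^ L - 1 + j) = L + 1 := pvBitLen_eq_of _ L (by omega) (by omega)
    have hblv : pvBitLen ((2 ^ L - 1 + j) / 2) = L := by
      have := pvBitLen_eq_of ((2 ^ L - 1 + j) / 2) (L - 1) (by omega)
        (by rw [show L - 1 + 1 = L from by omega]; omega)
      omega
    rw [hcast, haν, pvABit_pos_big _ (by omega), binStr_step _ hm0, diffBit_comm,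
      diffBit_trunc _ _ _ (by rw [binStr_length, binStr_length, hblν, hblv]),
      ← fixM_id ((2 ^ L - 1 + j) / 2), ← fixM_id (2 ^ L - 1), hblv, hblν,
      diffBit_fix L _ _ (by omega) (by omega),
      cnt_comm L ((2 ^ L - 1 + j) / 2) (2 ^ L - 1),
      cnt_allones_sub L ((2 ^ L - 1 + j) / 2) (by omega)]
  unfold GoodDelta
  refine ⟨by omega, by omega, ?_, ?_, ?_⟩
  · have hδe : (2 * 2 ^ (L - 3) - 1 : Nat) = 2 ^ (L - 2) - 1 := by omega
    rw [hδe]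
    exact mem_steps_pow_sub (L - 2) (by omega) (by omega)
  · rw [hdiff (2 * 2 ^ (L - 3) - 1) (by omega) le_rfl,
      show 2 ^ L - 1 - (2 ^ L - 1 + (2 * 2 ^ (L - 3) - 1)) / 2 = 3 * 2 ^ (L - 3) from by omega]
    have hval : cnt L (3 * 2 ^ (L - 3)) 0 = 2 := by
      have hweq : cnt L (3 * 2 ^ (L - 3)) 0
          = cnt ((L - 3) + 3) (0 + 2 ^ (L - 3) * 3) (0 + 2 ^ (L - 3) * 0) :=
        cnt_width_eq _ _ _ _ _ _ (by omega) (by omega) (by omega)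
      rw [hweq, cnt_split (L - 3) 3 _ _ _ _ (by omega) (by omega), cnt_self]
      rfl
    rw [hval]
    norm_num
  · intro j hj1 hj2
    rw [hdiff j hj1 (by omega)]
    have h3 := ones3 (L - 3) (2 ^ L - 1 - (2 ^ L - 1 + j) / 2) L (by omega) (by omega) (by omega)
    intro hcon
    have h4 : cnt L (2 ^ L - 1 - (2 ^ L - 1 + j) / 2) 0 ≤ 2 := by exact_mod_cast hcon
    omega

-- A's boundary case n = -2^k, k ≥ 16: the sign-magnitude strings have different lengths,
-- zip truncates, and the scan compares against bin(2^(k-1))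
lemma good_negE (k : Nat) (h16 : 16 ≤ k) (h31 : k ≤ 31) :
    GoodDelta (-((2 ^ k : Nat) : Int)) (2 ^ (k - 3)) := by
  have hP1 : 1 ≤ 2 ^ (k - 3) := Nat.one_le_two_pow
  have e1 : 2 ^ (k - 1) = 4 * 2 ^ (k - 3) := by
    calc 2 ^ (k - 1) = 2 ^ ((k - 3) + 2) := by congr 1; omega
    _ = 4 * 2 ^ (k - 3) := by rw [pow_succ, pow_succ]; ring
  have e0 : 2 ^ k = 8 * 2 ^ (k - 3) := by
    calc 2 ^ k = 2 ^ ((k - 3) + 3) := by congr 1; omega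
    _ = 8 * 2 ^ (k - 3) := by rw [pow_succ, pow_succ, pow_succ]; ring
  have e28 : (2 : Nat) ^ 28 = 268435456 := by norm_num
  have hPle : 2 ^ (k - 3) ≤ 2 ^ 28 := Nat.pow_le_pow_right (by norm_num) (by omega)
  have hblμ : pvBitLen (2 ^ k) = k + 1 := pvBitLen_eq_of _ k le_rfl (by rw [pow_succ]; omega)
  have hblh : pvBitLen (2 ^ (k - 1)) = k := by
    have := pvBitLen_eq_of (2 ^ (k - 1)) (k - 1) le_rfl (by rw [pow_succ]; omega)
    omega
  have haμ : pvABit (-((2 ^ k : Nat) : Int)) = '-' :: binStr (2 ^ k) :=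
    pvABit_neg_big _ (by omega) (by omega)
  have hsplit : binStr (2 ^ k) = binStr (2 ^ (k - 1)) ++ ['0'] := by
    rw [binStr_step (2 ^ k) (by omega), show 2 ^ k / 2 = 2 ^ (k - 1) from by omega,
      show 2 ^ k % 2 = 0 from by omega]
    rfl
  have hdiff : ∀ j : Nat, 1 ≤ j → j ≤ 2 ^ (k - 3) →
      pvDiffBit (pvABit (-((2 ^ k : Nat) : Int))) (pvABit (-((2 ^ k : Nat) : Int) + (j : Nat))) =
        (cnt (k - 1) (2 ^ k - j - 2 ^ (k - 1)) 0 : Int) := by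
    intro j hj1 hj2
    have hcast : -((2 ^ k : Nat) : Int) + (j : Nat) = -(((2 ^ k - j : Nat)) : Int) := by omega
    have hblv : pvBitLen (2 ^ k - j) = k := by
      have := pvBitLen_eq_of (2 ^ k - j) (k - 1) (by omega)
        (by rw [show k - 1 + 1 = k from by omega]; omega)
      omega
    rw [hcast, haμ, pvABit_neg_big (2 ^ k - j) (by omega) (by omega), diffBit_cons, hsplit,
      diffBit_trunc _ _ _ (by rw [binStr_length, binStr_length, hblh, hblv]),
      ← fixM_id (2 ^ (k - 1)), ← fixM_id (2 ^ k - j), hblh, hblv,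
      diffBit_fix k _ _ (by omega) (by omega)]
    have hweq : cnt k (2 ^ (k - 1)) (2 ^ k - j)
        = cnt ((k - 1) + 1) (0 + 2 ^ (k - 1) * 1) ((2 ^ k - j - 2 ^ (k - 1)) + 2 ^ (k - 1) * 1) :=
      cnt_width_eq _ _ _ _ _ _ (by omega) (by omega) (by omega)
    rw [hweq, cnt_split (k - 1) 1 _ _ _ _ (by omega) (by omega),
      cnt_comm (k - 1) 0 (2 ^ k - j - 2 ^ (k - 1))]
    have h11 : cnt 1 1 1 = 0 := rfl
    rw [h11]
    norm_num
  unfold GoodDelta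
  refine ⟨by omega, by omega, mem_steps_pow (k - 3) (by omega), ?_, ?_⟩
  · rw [hdiff (2 ^ (k - 3)) (by omega) le_rfl,
      show 2 ^ k - 2 ^ (k - 3) - 2 ^ (k - 1) = 3 * 2 ^ (k - 3) from by omega]
    have hval : cnt (k - 1) (3 * 2 ^ (k - 3)) 0 = 2 := by
      have hweq : cnt (k - 1) (3 * 2 ^ (k - 3)) 0
          = cnt ((k - 3) + 2) (0 + 2 ^ (k - 3) * 3) (0 + 2 ^ (k - 3) * 0) :=
        cnt_width_eq _ _ _ _ _ _ (by omega) (by omega) (by omega)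
      rw [hweq, cnt_split (k - 3) 2 _ _ _ _ (by omega) (by omega), cnt_self]
      rfl
    rw [hval]
    norm_num
  · intro j hj1 hj2
    rw [hdiff j hj1 (by omega)]
    have h3 := ones3 (k - 3) (2 ^ k - j - 2 ^ (k - 1)) (k - 1) (by omega) (by omega) (by omega)
    intro hcon
    have h4 : cnt (k - 1) (2 ^ k - j - 2 ^ (k - 1)) 0 ≤ 2 := by exact_mod_cast hcon
    omega

-- dispatch: every |n| ≤ 2^31 falls in one of the four cases
lemma good_exists (n : Int) (h1 : -2147483648 ≤ n) (h2 : n ≤ 2147483648) :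
    ∃ δ : Nat, GoodDelta n δ := by
  have e31 : (2 : Nat) ^ 31 = 2147483648 := by norm_num
  by_cases hn : 0 ≤ n
  · by_cases hg : 17 ≤ pvBitLen n.toNat ∧ n.toNat = 2 ^ pvBitLen n.toNat - 1
    · obtain ⟨hL17, hval⟩ := hg
      have h1p : 1 ≤ 2 ^ pvBitLen n.toNat := Nat.one_le_two_pow
      set L := pvBitLen n.toNat with hLdef
      have hL31 : L ≤ 31 := by
        by_contra hh
        have h32 : 2 ^ 32 ≤ 2 ^ L := Nat.pow_le_pow_right (by norm_num) (by omega)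
        have e32 : (2 : Nat) ^ 32 = 4294967296 := by norm_num
        omega
      clear_value L
      have hne : n = ((2 ^ L - 1 : Nat) : Int) := by omega
      subst hne
      exact ⟨2 * 2 ^ (L - 3) - 1, good_posE L hL17 hL31⟩
    · have hν : n = ((n.toNat : Nat) : Int) := by omega
      rw [hν]
      apply good_pos n.toNat (by omega)
      intro hL heq
      have h1p : 1 ≤ 2 ^ pvBitLen n.toNat := Nat.one_le_two_pow
      exact hg ⟨hL, by omega⟩
  · have hμpos : 1 ≤ (-n).toNat := by omega
    by_cases hg : 17 ≤ pvBitLen (-n).toNat ∧ (-n).toNat = 2 ^ (pvBitLen (-n).toNat - 1)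
    · obtain ⟨hL17, hval⟩ := hg
      have h1p : 1 ≤ 2 ^ (pvBitLen (-n).toNat - 1) := Nat.one_le_two_pow
      set K := pvBitLen (-n).toNat - 1 with hKdef
      have hK31 : K ≤ 31 := by
        by_contra hh
        have h32 : 2 ^ 32 ≤ 2 ^ K := Nat.pow_le_pow_right (by norm_num) (by omega)
        have e32 : (2 : Nat) ^ 32 = 4294967296 := by norm_num
        omega
      have hK16 : 16 ≤ K := by omega
      clear_value K
      have hne : n = -((2 ^ K : Nat) : Int) := by omega
      subst hne
      exact ⟨2 ^ (K - 3), good_negE K hK16 hK31⟩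
    · have hν : n = -(((-n).toNat : Nat) : Int) := by omega
      rw [hν]
      apply good_neg (-n).toNat hμpos (by omega)
      intro k hk heq
      have hbl : pvBitLen (-n).toNat = k + 1 := by
        have hle : pvBitLen (-n).toNat ≤ k + 1 := (pvBitLen_le_iff _ _).mpr (by
          rw [heq, pow_succ]
          have : 1 ≤ 2 ^ k := Nat.one_le_two_pow
          omega)
        have hgt : ¬ pvBitLen (-n).toNat ≤ k := by
          rw [pvBitLen_le_iff]
          omega
        omega
      exact hg ⟨by omega, by rw [hbl]; simpa using heq⟩

lemma foldl_append_eq_map (f : Int → Int) (xs : List Int) : ∀ init,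
    xs.foldl (fun acc x => acc ++ [f x]) init = init ++ xs.map f := by
  induction xs with
  | nil => intro init; simp
  | cons x xs ih => intro init; simp [List.foldl_cons, ih]

lemma solution_eq_map (numbers : List Int) :
    solution numbers = numbers.map (fun n => pvLoopA 2147483648 (pvABit n) n) := by
  unfold solution
  rw [foldl_append_eq_map]
  simp

lemma foldl_append_toList (g : Int → Option Int) (xs : List Int) : ∀ init,
    xs.foldl (fun acc n => acc ++ (g n).toList) init
      = init ++ xs.flatMap (fun n => (g n).toList) := by
  induction xs with
  | nil => intro init; simp
  | cons x xs ih => intro init; simp [List.foldl_cons, ih]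

lemma flatMap_singleton_eq_map (f : Int → Int) (g : Int → List Int) :
    ∀ l : List Int, (∀ x ∈ l, g x = [f x]) → l.flatMap g = l.map f := by
  intro l
  induction l with
  | nil => intro _; rfl
  | cons x xs ih =>
    intro h
    rw [List.flatMap_cons, List.map_cons, h x (List.mem_cons_self),
      ih (fun y hy => h y (List.mem_cons_of_mem _ hy))]
    rfl

-- ===== VERDICT (by name: the statement is the Claim_ definition above) =====
theorem solution_spec : Claim_equal_solution := by
  intro numbers hDom
  show solution numbers = solution_alt numbers
  rw [solution_eq_map]
  unfold solution_alt
  rw [foldl_append_toList]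
  simp only [List.nil_append]
  refine (flatMap_singleton_eq_map _ _ numbers ?_).symm
  intro x hx
  have hdom : pvDomInt x = true := List.all_eq_true.mp hDom x hx
  have hb : -2147483648 ≤ x ∧ x ≤ 2147483648 := by
    simpa [pvDomInt] using hdom
  obtain ⟨δ, hgd⟩ := good_exists x hb.1 hb.2
  rw [B_of_good x δ hgd, A_of_good x δ hgd]
  rfl
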